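-- pv_equiv track=rewrite | github.com/Antweneee/Epitech | Third-Year-Projects/AIA/Gomoku/marvin/evaluation.py | gScore
-- ===== SOURCE A (Python) =====
-- HORIZONTAL      =   (1)
--
-- ADJ_MATRIX      =   [0, 2, 4, 8, 16, 32]
--
-- def adjScore(sr) -> int:
--     try:
--         return ADJ_MATRIX[sr]
--     except:
--         return -1
--
-- def blockScore(piece, curr, sr, score) -> tuple:
--     if piece != curr:
--         if curr == 0:
--             curr = piece
--             sr = 1
--         else:
--             score += curr * adjScore(sr)
--             curr = piece
--             sr = 1
--     else:
--         if piece != 0: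
--             sr += 1
--     return curr, sr, score
--
-- def gScore(board, check) -> int:
--     score = 0
--     for line in range(len(board)):
--         curr = 0
--         sr = 0
--         for column in range(len(board)):
--             curr, sr, score = blockScore(board[line][column] if check == HORIZONTAL else board[column][line], curr, sr, score)
--         if curr != 0:
--             score += curr * adjScore(sr)
--     return score * -1
-- ===== SOURCE B (Python) =====
-- ADJ_SCORES = [0, 2, 4, 8, 16, 32]
--
-- def _adj(run):
--     return ADJ_SCORES[run] if run < len(ADJ_SCORES) else -1
--
-- def _lineScore(line):
--     # score of one line as a sum over its maximal runs of equal non-zero values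
--     if not line:
--         return 0
--     v = line[0]
--     run = 1
--     while run < len(line) and line[run] == v:
--         run += 1
--     rest = _lineScore(line[run:])
--     if v == 0:
--         return rest
--     return v * _adj(run) + rest
--
-- def gScore(board, check):
--     n = len(board)
--     total = 0
--     for i in range(n):
--         line = [board[i][c] if check == 1 else board[c][i] for c in range(n)]
--         total += _lineScore(line)
--     return -total
-- ===== Notes on version B (the rewrite author's own statement) =====
-- stated objective: simpler
-- what changed: Replaced A's per-cell (curr, sr, score) state-machine accumulator threaded through blockScore by direct enumeration of each line's maximal runs (a recursive run decomposition scoring value*adjScore(run_length) per non-zero run).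
import Mathlib
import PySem

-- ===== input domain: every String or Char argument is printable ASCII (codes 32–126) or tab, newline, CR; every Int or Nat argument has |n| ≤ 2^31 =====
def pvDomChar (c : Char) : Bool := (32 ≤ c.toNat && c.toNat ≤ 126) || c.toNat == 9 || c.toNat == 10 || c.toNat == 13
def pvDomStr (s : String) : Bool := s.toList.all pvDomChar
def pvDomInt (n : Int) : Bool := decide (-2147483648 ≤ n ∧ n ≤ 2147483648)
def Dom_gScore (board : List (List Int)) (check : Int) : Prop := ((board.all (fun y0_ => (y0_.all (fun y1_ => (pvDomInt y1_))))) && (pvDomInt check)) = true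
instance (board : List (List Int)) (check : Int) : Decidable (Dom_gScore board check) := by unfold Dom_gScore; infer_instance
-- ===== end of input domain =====

-- B replaces A's per-cell (curr, sr, score) state machine by direct enumeration of the
-- maximal runs of each line (recursive run decomposition); objective: simpler.

-- ===== PORT A =====
def ADJ_MATRIX : List Int := [0, 2, 4, 8, 16, 32]

def adjScore (sr : Int) : Int :=
  match PySem.List.pyGet? ADJ_MATRIX sr with
  | some v => v
  | none => -1

def blockScore (piece curr sr score : Int) : Int × Int × Int :=
  if piece ≠ curr then
    if curr = 0 then (piece, 1, score)
    else (piece, 1, score + curr * adjScore sr)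
  else if piece ≠ 0 then (curr, sr + 1, score)
  else (curr, sr, score)

def gScore (board : List (List Int)) (check : Int) : Int :=
  let n : Int := board.length
  let score :=
    (PySem.List.pyRange 0 n 1).foldl (fun score line =>
      let st := (PySem.List.pyRange 0 n 1).foldl
        (fun (st : Int × Int × Int) column =>
          let piece := if check = 1
            then PySem.List.pyGetD (PySem.List.pyGetD board line []) column 0
            else PySem.List.pyGetD (PySem.List.pyGetD board column []) line 0
          blockScore piece st.1 st.2.1 st.2.2)
        (0, 0, score)
      if st.1 ≠ 0 then st.2.2 + st.1 * adjScore st.2.1 else st.2.2)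
      0
  score * -1

-- ===== PORT B =====
def ADJ_SCORES : List Int := [0, 2, 4, 8, 16, 32]

def adjB (run : Nat) : Int :=
  if run < ADJ_SCORES.length then ADJ_SCORES.getD run 0 else -1

def lineScore : List Int → Int
  | [] => 0
  | v :: rest =>
    -- run = 1 + number of leading elements of rest equal to v; recurse on line[run:]
    let run := 1 + (rest.takeWhile (fun x => x == v)).length
    let restScore := lineScore (rest.dropWhile (fun x => x == v))
    if v = 0 then restScore else v * adjB run + restScore
termination_by l => l.length
decreasing_by
  simp only [List.length_cons]
  exact Nat.lt_succ_of_le (List.length_dropWhile_le _ _)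

def gScore_alt (board : List (List Int)) (check : Int) : Int :=
  let n : Int := board.length
  let total := (PySem.List.pyRange 0 n 1).foldl (fun total i =>
    let line := (PySem.List.pyRange 0 n 1).map (fun c =>
      if check = 1
        then PySem.List.pyGetD (PySem.List.pyGetD board i []) c 0
        else PySem.List.pyGetD (PySem.List.pyGetD board c []) i 0)
    total + lineScore line) 0
  Neg.neg total  -- Python's unary '-total'

-- ===== PRECONDITION & SPEC =====
-- Pre_ excludes exactly the inputs on which the Python A raises IndexError:
-- boards with a row shorter than the board's height (A indexes every row at 0..len(board)-1).
def Pre_gScore (board : List (List Int)) (check : Int) : Prop :=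
  ∀ row ∈ board, board.length ≤ row.length
instance (board : List (List Int)) (check : Int) : Decidable (Pre_gScore board check) := by
  unfold Pre_gScore; infer_instance

def pvWitness_gScore : List (List Int) × Int := ([[1, 1, 0], [0, -1, -1], [1, 0, 1]], 1)

def Spec_gScore (board : List (List Int)) (check : Int) (out : Int) : Prop := out = gScore_alt board check
instance (board : List (List Int)) (check : Int) (out : Int) : Decidable (Spec_gScore board check out) := by unfold Spec_gScore; infer_instance

-- ===== CLAIM (what is proved, stated in full; the proofs are below) =====
def Claim_equal_gScore : Prop := ∀ (board : List (List Int)) (check : Int), Dom_gScore board check → Pre_gScore board check → Spec_gScore board check (gScore board check)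

-- ===== LEMMAS AND PROOFS =====

-- A's inner-loop step as a one-argument state transformer
def pvStep (st : Int × Int × Int) (piece : Int) : Int × Int × Int :=
  blockScore piece st.1 st.2.1 st.2.2

-- A's post-loop flush
def pvFinish (st : Int × Int × Int) : Int :=
  if st.1 ≠ 0 then st.2.2 + st.1 * adjScore st.2.1 else st.2.2

theorem adj_eq (m : Nat) : adjScore (m : Int) = adjB m := by
  by_cases h : m < 6
  · interval_cases m <;> decide
  · simp only [adjScore, adjB, ADJ_MATRIX, ADJ_SCORES]
    rw [PySem.List.pyGet?_natCast]
    rw [List.getElem?_eq_none (by simp; omega)]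
    simp [h]

theorem lineScore_nil : lineScore [] = 0 := by simp [lineScore]

theorem lineScore_cons (v : Int) (rest : List Int) :
    lineScore (v :: rest) =
      if v = 0 then lineScore (rest.dropWhile (fun x => x == v))
      else v * adjB (1 + (rest.takeWhile (fun x => x == v)).length)
            + lineScore (rest.dropWhile (fun x => x == v)) := by
  rw [lineScore]

theorem lineScore_zero_run (rest : List Int) :
    lineScore (rest.dropWhile (fun x => x == (0 : Int))) = lineScore rest := by
  match rest with
  | [] => rfl
  | v :: r =>
    by_cases hv : v = 0
    · subst hv
      rw [List.dropWhile_cons_of_pos (by simp)]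
      rw [lineScore_zero_run r]
      rw [lineScore_cons]
      simp [lineScore_zero_run r]
    · rw [List.dropWhile_cons_of_neg (by simp [hv])]
termination_by rest.length
decreasing_by
  simp only [List.length_cons]
  omega

theorem lineScore_zero_cons (rest : List Int) :
    lineScore ((0 : Int) :: rest) = lineScore rest := by
  rw [lineScore_cons]; simp [lineScore_zero_run rest]

theorem main_lemma (line : List Int) (curr : Int) (m : Nat) (s : Int) :
    pvFinish (line.foldl pvStep (curr, (m : Int), s)) =
      if curr = 0 then s + lineScore line
      else s + curr * adjB (m + (line.takeWhile (fun x => x == curr)).length)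
             + lineScore (line.dropWhile (fun x => x == curr)) := by
  induction line generalizing curr m s with
  | nil =>
    simp only [List.foldl_nil, pvFinish, lineScore_nil, List.takeWhile_nil, List.dropWhile_nil,
      List.length_nil, Nat.add_zero]
    by_cases h : curr = 0
    · simp [h]
    · simp [h, adj_eq]
  | cons p rest ih =>
    simp only [List.foldl_cons]
    by_cases hc : curr = 0
    · subst hc
      by_cases hp : p = 0
      · subst hp
        have hst : pvStep (0, (m : Int), s) 0 = (0, (m : Int), s) := by
          simp [pvStep, blockScore]
        rw [hst, ih 0 m s, lineScore_zero_cons]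
        simp
      · have hst : pvStep (0, (m : Int), s) p = (p, ((1 : Nat) : Int), s) := by
          simp [pvStep, blockScore, hp]
        rw [hst, ih p 1 s, if_neg hp, if_pos rfl, lineScore_cons, if_neg hp]
        ring
    · by_cases hpc : p = curr
      · subst hpc
        have hp0 : p ≠ 0 := hc
        have hst : pvStep (p, (m : Int), s) p = (p, ((m + 1 : Nat) : Int), s) := by
          simp [pvStep, blockScore, hp0]
        rw [hst, ih p (m + 1) s]
        simp only [if_neg hc]
        rw [List.takeWhile_cons_of_pos (by simp), List.dropWhile_cons_of_pos (by simp)]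
        simp only [List.length_cons]
        ring_nf
      · have hst : pvStep (curr, (m : Int), s) p =
            (p, ((1 : Nat) : Int), s + curr * adjScore m) := by
          simp [pvStep, blockScore, hpc, hc]
        rw [hst]
        rw [List.takeWhile_cons_of_neg (by simp [hpc]), List.dropWhile_cons_of_neg (by simp [hpc])]
        simp only [List.length_nil, Nat.add_zero, if_neg hc]
        by_cases hp : p = 0
        · subst hp
          rw [ih 0 1 _, if_pos rfl, lineScore_zero_cons]
          simp [adj_eq, add_assoc]
        · rw [ih p 1 _]
          simp only [if_neg hp]
          rw [lineScore_cons]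
          simp only [if_neg hp, adj_eq]
          ring

-- per-line bodies of the two outer folds agree
theorem body_eq (cell : Int → Int) (n : Int) (s : Int) :
    pvFinish ((PySem.List.pyRange 0 n 1).foldl
        (fun (st : Int × Int × Int) c => pvStep st (cell c)) (0, 0, s))
      = s + lineScore ((PySem.List.pyRange 0 n 1).map cell) := by
  have h := main_lemma ((PySem.List.pyRange 0 n 1).map cell) 0 0 s
  simp only [Nat.cast_zero, if_true] at h
  rw [← h, List.foldl_map]

-- ===== VERDICT (by name: the statement is the Claim_ definition above) =====
theorem gScore_spec : Claim_equal_gScore := by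
  intro board check _ _
  unfold Spec_gScore gScore gScore_alt
  simp only []
  set n : Int := (board.length : Int) with hn
  -- rewrite A's outer fold body into B's via body_eq
  have hcong : ∀ (l : List Int) (s : Int),
      l.foldl (fun s i =>
        pvFinish ((PySem.List.pyRange 0 n 1).foldl
          (fun (st : Int × Int × Int) c =>
            pvStep st (if check = 1
              then PySem.List.pyGetD (PySem.List.pyGetD board i []) c 0
              else PySem.List.pyGetD (PySem.List.pyGetD board c []) i 0)) (0, 0, s))) s
      = l.foldl (fun s i =>
        s + lineScore ((PySem.List.pyRange 0 n 1).map (fun c =>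
          if check = 1
            then PySem.List.pyGetD (PySem.List.pyGetD board i []) c 0
            else PySem.List.pyGetD (PySem.List.pyGetD board c []) i 0))) s := by
    intro l
    induction l with
    | nil => intro s; rfl
    | cons x xs ih =>
      intro s
      simp only [List.foldl_cons]
      rw [body_eq, ih]
  show (List.foldl _ 0 _) * -1 = -(List.foldl _ 0 _)
  rw [show ∀ a : Int, a * -1 = -a from fun a => by ring]
  congr 1
  exact hcong _ 0
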